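-- pv_equiv track=rewrite | github.com/work-with-arslan/sarcasm-detection | sarcasm_core.py | apply_negation
-- ===== SOURCE A (Python) =====
-- NEGATION_WORDS = {'not', 'no', 'never', "don't", "didn't", "isn't", "wasn't"}
--
-- def count_vowels(word: str) -> int:
--     """Return the number of vowels in a word (used for negation window size)."""
--     return sum(1 for ch in word.lower() if ch in 'aeiou')
--
-- def apply_negation(tokens: list) -> list:
--     """
--     Step 2 – Negation Handling:
--     For every negation word, count its vowels (N).
--     Prefix the next N tokens with NOT_.
--     e.g. "not" (1 vowel) → prefix next 1 token
--          "never" (2 vowels) → prefix next 2 tokens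
--     NOT_-prefixed tokens are immune to stopword removal.
--     """
--     result, i = [], 0
--     while i < len(tokens):
--         tok = tokens[i]
--         if tok in NEGATION_WORDS:
--             result.append(tok)
--             n_vowels = count_vowels(tok)
--             i += 1
--             for _ in range(n_vowels):
--                 if i < len(tokens):
--                     result.append('NOT_' + tokens[i])
--                     i += 1
--         else:
--             result.append(tok)
--             i += 1
--     return result
-- ===== SOURCE B (Python) =====
-- NEGATION_WORDS = {'not', 'no', 'never', "don't", "didn't", "isn't", "wasn't"}
--
-- def count_vowels(word: str) -> int:
--     """Return the number of vowels in a word (used for negation window size)."""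
--     return sum(1 for ch in word.lower() if ch in 'aeiou')
--
-- def apply_negation(tokens: list) -> list:
--     """Flat single pass maintaining a 'NOT_' countdown window instead of an inner loop."""
--     result, window = [], 0
--     for tok in tokens:
--         if window > 0:
--             result.append('NOT_' + tok)
--             window -= 1
--         elif tok in NEGATION_WORDS:
--             result.append(tok)
--             window = count_vowels(tok)
--         else:
--             result.append(tok)
--     return result
-- ===== Notes on version B (the rewrite author's own statement) =====
-- stated objective: simpler
-- what changed: Replaced the index-based while loop with a nested for-loop by a single flat pass over the tokens that keeps an integer countdown window for the remaining NOT_-prefix slots.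
import Mathlib
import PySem

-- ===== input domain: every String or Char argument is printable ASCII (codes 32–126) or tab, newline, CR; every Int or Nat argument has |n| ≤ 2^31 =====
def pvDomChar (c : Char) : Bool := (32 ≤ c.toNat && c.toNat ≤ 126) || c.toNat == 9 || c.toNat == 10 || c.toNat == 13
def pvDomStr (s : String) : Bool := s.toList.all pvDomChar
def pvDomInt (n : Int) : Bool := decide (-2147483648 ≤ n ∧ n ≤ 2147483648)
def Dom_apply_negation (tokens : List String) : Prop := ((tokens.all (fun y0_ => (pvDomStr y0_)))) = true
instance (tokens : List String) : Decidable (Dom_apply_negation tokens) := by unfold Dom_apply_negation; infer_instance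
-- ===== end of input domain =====

-- B changes only the decomposition (flat countdown-window pass instead of nested loops); same output, same cost.

-- shared module constant: NEGATION_WORDS (a Python set of distinct string literals)
def negationWords : PySem.Set String :=
  PySem.Set.ofList ["not", "no", "never", "don't", "didn't", "isn't", "wasn't"]

-- shared helper count_vowels: sum(1 for ch in word.lower() if ch in 'aeiou')
def countVowels (word : String) : Nat :=
  (PySem.Chars.lower word.toList).countP (fun ch => ch ∈ ['a', 'e', 'i', 'o', 'u'])

-- ===== PORT A =====
-- A's outer while-loop over index i (goA) with the inner 'for _ in range(n_vowels)'
-- loop (innerA n) that prefixes up to n following tokens; the index walk is the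
-- structural recursion on the remaining suffix of tokens.
mutual
  def goA : List String → List String
    | [] => []
    | tok :: rest =>
      if negationWords.contains tok then tok :: innerA (countVowels tok) rest
      else tok :: goA rest
    termination_by l => (l.length, 0)
  def innerA : Nat → List String → List String
    | 0, rest => goA rest
    | _ + 1, [] => []      -- inner iterations with i ≥ len(tokens) append nothing; outer while then exits
    | n + 1, t :: rest => ("NOT_" ++ t) :: innerA n rest
    termination_by _ l => (l.length, 1)
end

def apply_negation (tokens : List String) : List String := goA tokens

-- ===== PORT B =====
-- B: one flat fold over tokens carrying (result, window countdown).
def stepB (st : List String × Nat) (tok : String) : List String × Nat :=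
  if st.2 > 0 then (st.1 ++ ["NOT_" ++ tok], st.2 - 1)
  else if negationWords.contains tok then (st.1 ++ [tok], countVowels tok)
  else (st.1 ++ [tok], 0)

def apply_negation_alt (tokens : List String) : List String :=
  (tokens.foldl stepB ([], 0)).1

-- ===== PRECONDITION & SPEC =====
def Spec_apply_negation (tokens : List String) (out : List String) : Prop := out = apply_negation_alt tokens
instance (tokens : List String) (out : List String) : Decidable (Spec_apply_negation tokens out) := by unfold Spec_apply_negation; infer_instance

-- ===== CLAIM (what is proved, stated in full; the proofs are below) =====
def Claim_equal_apply_negation : Prop := ∀ (tokens : List String), Dom_apply_negation tokens → Spec_apply_negation tokens (apply_negation tokens)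

-- ===== LEMMAS AND PROOFS =====

-- the fold's first component accumulates exactly innerA's output (window w ↔ innerA w)
theorem innerA_nil (w : Nat) : innerA w [] = [] := by
  cases w <;> simp [innerA, goA]

theorem foldl_stepB_eq (l : List String) : ∀ (acc : List String) (w : Nat),
    (l.foldl stepB (acc, w)).1 = acc ++ innerA w l := by
  induction l with
  | nil => intro acc w; simp [innerA_nil]
  | cons tok rest ih =>
    intro acc w
    cases w with
    | zero =>
      by_cases h : tok ∈ negationWords
      · simp [stepB, h, ih, innerA, goA]
      · simp [stepB, h, ih, innerA, goA]
    | succ n =>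
      simp [stepB, ih, innerA]

-- ===== VERDICT (by name: the statement is the Claim_ definition above) =====
theorem apply_negation_spec : Claim_equal_apply_negation := by
  intro tokens _
  unfold Spec_apply_negation apply_negation apply_negation_alt
  have h := foldl_stepB_eq tokens [] 0
  rw [show innerA 0 tokens = goA tokens from by simp [innerA]] at h
  simp [h]
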